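-- pv_equiv track=rewrite | github.com/Xelanor/StockNinjaPython | consecutive_analysis.py | calculate_consecutive_days
-- ===== SOURCE A (Python) =====
-- def calculate_consecutive_days(data):
--
--     data = data[::-1]
--
--     first_event = data[0] - data[1]  # If positive increasing else decreasing
--     first_event = True if first_event >= 0 else False
--
--     days = 1
--
--     for i in range(1, len(data) - 1):
--         event = True if data[i] - data[i + 1] >= 0 else False
--
--         if event == first_event:
--             days += 1
--         else:
--             break
--
--     return days, first_event
-- ===== SOURCE B (Python) =====
-- def calculate_consecutive_days(data):
--     # Run-length-encode the adjacent direction sequence in one forward pass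
--     # (no reversal, no early exit), then report the last run.
--     runs = []
--     for prev, cur in zip(data, data[1:]):
--         e = cur - prev >= 0
--         if runs and runs[-1][0] == e:
--             runs[-1] = (e, runs[-1][1] + 1)
--         else:
--             runs.append((e, 1))
--     k, c = runs[-1]
--     return c, k
-- ===== Notes on version B (the rewrite author's own statement) =====
-- stated objective: alternative
-- what changed: B builds a run-length encoding of the whole adjacent-direction sequence in one forward pass (maintaining (direction, length) runs, no reversal and no early break) and returns the last run, instead of A's reverse-the-list backward index loop that breaks at the first mismatch.
-- outside the precondition, e.g. on calculate_consecutive_days([5]): A raises IndexError, B raises IndexError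
import Mathlib
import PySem

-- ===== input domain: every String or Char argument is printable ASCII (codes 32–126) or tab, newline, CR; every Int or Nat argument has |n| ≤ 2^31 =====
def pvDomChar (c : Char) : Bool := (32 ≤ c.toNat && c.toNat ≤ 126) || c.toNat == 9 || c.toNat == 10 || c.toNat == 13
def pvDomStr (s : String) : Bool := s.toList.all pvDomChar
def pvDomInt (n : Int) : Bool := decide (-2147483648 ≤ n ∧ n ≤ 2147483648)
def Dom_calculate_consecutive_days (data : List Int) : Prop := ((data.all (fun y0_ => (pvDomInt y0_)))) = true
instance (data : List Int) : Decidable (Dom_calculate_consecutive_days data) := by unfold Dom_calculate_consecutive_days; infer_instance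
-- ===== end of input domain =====

-- B run-length-encodes the forward direction sequence in one pass and returns the last run; alternative decomposition, same O(n) cost.

-- ===== PORT A =====
-- the for-loop over range(1, len(data)-1) with an early break; pyGetD defaults are
-- unreachable under Pre_ (all indices are in range)
def pvALoop (d : List Int) (first : Bool) : List Int → Int → Int
  | [], days => days
  | i :: rest, days =>
      let event := decide (PySem.List.pyGetD d i 0 - PySem.List.pyGetD d (i + 1) 0 ≥ 0)
      if event == first then pvALoop d first rest (days + 1) else days

def calculate_consecutive_days (data : List Int) : Int × Bool :=
  let d := (PySem.List.slice? data none none (-1)).getD []   -- data = data[::-1]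
  -- data[0] - data[1]; IndexError (len < 2) is excluded by Pre_, default 0 is unreachable there
  let first := decide (PySem.List.pyGetD d 0 0 - PySem.List.pyGetD d 1 0 ≥ 0)
  (pvALoop d first (PySem.List.pyRange 1 ((d.length : Int) - 1) 1) 1, first)

-- ===== PORT B =====
-- one iteration of Source B's loop body: extend the last run or start a new one
def pvBStep (runs : List (Bool × Int)) (e : Bool) : List (Bool × Int) :=
  match runs.getLast? with                                   -- `runs and runs[-1][0] == e`
  | some (k, c) => if k == e then runs.dropLast ++ [(e, c + 1)] else runs ++ [(e, 1)]
  | none => runs ++ [(e, 1)]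

def calculate_consecutive_days_alt (data : List Int) : Int × Bool :=
  -- for prev, cur in zip(data, data[1:]): run-length encode the direction sequence
  let runs := (List.zipWith (fun a b => decide (b - a ≥ 0)) data data.tail).foldl pvBStep []
  -- k, c = runs[-1]; IndexError (runs empty, i.e. len(data) < 2) is excluded by Pre_
  let last := (PySem.List.pyGet? runs (-1)).getD (false, 0)
  (last.2, last.1)

-- ===== PRECONDITION & SPEC =====
-- Pre_ excludes exactly the inputs with fewer than two elements, on which the Python A
-- raises IndexError (data[1] on the reversed list), and B raises too (runs[-1] on []).
def Pre_calculate_consecutive_days (data : List Int) : Prop := 2 ≤ data.length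
instance (data : List Int) : Decidable (Pre_calculate_consecutive_days data) := by
  unfold Pre_calculate_consecutive_days; infer_instance

def pvWitness_calculate_consecutive_days : List Int := [1, 2, 3]

def Spec_calculate_consecutive_days (data : List Int) (out : Int × Bool) : Prop := out = calculate_consecutive_days_alt data
instance (data : List Int) (out : Int × Bool) : Decidable (Spec_calculate_consecutive_days data out) := by unfold Spec_calculate_consecutive_days; infer_instance

-- ===== CLAIM (what is proved, stated in full; the proofs are below) =====
def Claim_equal_calculate_consecutive_days : Prop := ∀ (data : List Int), Dom_calculate_consecutive_days data → Pre_calculate_consecutive_days data → Spec_calculate_consecutive_days data (calculate_consecutive_days data)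

-- ===== LEMMAS AND PROOFS =====

-- leading-run counter: days plus the length of the leading run of `first` entries
def pvRunLoop (first : Bool) : List Bool → Int → Int
  | [], days => days
  | e :: rest, days => if e != first then days else pvRunLoop first rest (days + 1)

-- adjacent pairs of a list, compared backward (earlier minus later), as seen on the reversed data
def pvPairs : List Int → List Bool
  | a :: b :: t => decide (a - b ≥ 0) :: pvPairs (b :: t)
  | _ => []

-- adjacent pairs compared forward (later minus earlier), as B's direction list
def pvPairsF : List Int → List Bool
  | a :: b :: t => decide (b - a ≥ 0) :: pvPairsF (b :: t)
  | _ => []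

theorem pvPairs_short (l : List Int) (h : l.length ≤ 1) : pvPairs l = [] := by
  cases l with
  | nil => rfl
  | cons a t =>
    cases t with
    | nil => rfl
    | cons b t' => simp at h

theorem pvPairsF_eq_zipWith (l : List Int) :
    List.zipWith (fun a b => decide (b - a ≥ 0)) l l.tail = pvPairsF l := by
  induction l with
  | nil => rfl
  | cons a t ih =>
    cases t with
    | nil => rfl
    | cons b t' =>
      simp only [List.tail_cons, List.zipWith, pvPairsF]
      exact congrArg _ ih

theorem pvPairs_snoc (xs : List Int) (x a : Int) :
    pvPairs (xs ++ [x] ++ [a]) = pvPairs (xs ++ [x]) ++ [decide (x - a ≥ 0)] := by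
  induction xs with
  | nil => rfl
  | cons y t ih =>
    cases t with
    | nil => rfl
    | cons z t' =>
      simp only [List.cons_append, pvPairs] at *
      rw [ih]

theorem pvPairsF_reverse (l : List Int) : (pvPairsF l).reverse = pvPairs l.reverse := by
  induction l with
  | nil => rfl
  | cons a t ih =>
    cases t with
    | nil => rfl
    | cons b t' =>
      simp only [pvPairsF, List.reverse_cons]
      rw [ih]
      simp only [List.reverse_cons]
      rw [pvPairs_snoc]

-- A's index loop equals the leading-run count over the backward pair list of the suffix
theorem pvALoop_eq (d : List Int) (first : Bool) (k : Nat) :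
    ∀ (i : Nat) (days : Int), d.length ≤ i + k → 1 ≤ i →
    pvALoop d first (PySem.List.pyRange (i : Int) ((d.length : Int) - 1) 1) days
      = pvRunLoop first (pvPairs (d.drop i)) days := by
  induction k with
  | zero =>
    intro i days hle _
    rw [PySem.List.pyRange_one_eq_nil (by omega)]
    rw [List.drop_eq_nil_of_le (by omega), pvPairs_short _ (by simp), pvALoop, pvRunLoop]
  | succ k ih =>
    intro i days hle h1
    by_cases h : i + 1 < d.length
    · have hi : i < d.length := by omega
      have hi1 : i + 1 < d.length := h
      rw [PySem.List.pyRange_one_cons (by omega)]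
      have hg1 : PySem.List.pyGetD d (i : Int) 0 = d[i] := by
        rw [PySem.List.pyGetD_natCast]; exact List.getD_eq_getElem d 0 hi
      have hg2 : PySem.List.pyGetD d ((i : Int) + 1) 0 = d[i + 1] := by
        have : ((i : Int) + 1) = ((i + 1 : Nat) : Int) := by push_cast; ring
        rw [this, PySem.List.pyGetD_natCast]; exact List.getD_eq_getElem d 0 hi1
      have hdrop : d.drop i = d[i] :: d[i + 1] :: d.drop (i + 2) := by
        rw [List.drop_eq_getElem_cons hi, List.drop_eq_getElem_cons hi1]
      rw [pvALoop, hdrop, pvPairs, pvRunLoop]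
      simp only [hg1, hg2]
      have hdrop1 : d[i + 1] :: d.drop (i + 2) = d.drop (i + 1) := by
        rw [List.drop_eq_getElem_cons hi1]
      have hbne : (decide (d[i] - d[i + 1] ≥ 0) != first)
          = !(decide (d[i] - d[i + 1] ≥ 0) == first) := rfl
      by_cases hb : (decide (d[i] - d[i + 1] ≥ 0) == first) = true
      · have hb' : (decide (d[i] - d[i + 1] ≥ 0) != first) = false := by rw [hbne, hb]; rfl
        simp only [hb, hb', if_true, Bool.false_eq_true, if_false]
        have hc : ((i : Int) + 1) = ((i + 1 : Nat) : Int) := by push_cast; ring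
        rw [hc, hdrop1, ih (i + 1) (days + 1) (by omega) (by omega)]
      · rw [Bool.not_eq_true] at hb
        have hb' : (decide (d[i] - d[i + 1] ≥ 0) != first) = true := by rw [hbne, hb]; rfl
        simp only [hb, hb', if_true, Bool.false_eq_true, if_false]
    · rw [PySem.List.pyRange_one_eq_nil (by omega)]
      rw [pvPairs_short _ (by simp [List.length_drop]; omega), pvALoop, pvRunLoop]

theorem pvRunLoop_add (first : Bool) (bs : List Bool) (d : Int) :
    pvRunLoop first bs (d + 1) = pvRunLoop first bs d + 1 := by
  induction bs generalizing d with
  | nil => rfl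
  | cons e rest ih =>
    by_cases he : (e != first) = true
    · simp [pvRunLoop, he]
    · simp only [Bool.not_eq_true] at he
      simp [pvRunLoop, he, ih]

-- the RLE fold's last run is (head of reversed dirs, its leading-run count)
theorem pvRle_lastRun (l : List Bool) :
    ∀ k rest, l.reverse = k :: rest →
    ∃ pre, l.foldl pvBStep [] = pre ++ [(k, pvRunLoop k (k :: rest) 0)] := by
  induction l using List.reverseRecOn with
  | nil => intro k rest h; simp at h
  | append_singleton l' e ih =>
    intro k rest h
    rw [List.reverse_append, List.reverse_singleton, List.singleton_append] at h
    obtain ⟨hk, hrest⟩ : e = k ∧ l'.reverse = rest := by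
      constructor <;> [exact (List.cons.injEq ..).mp h |>.1; exact (List.cons.injEq ..).mp h |>.2]
    subst hk; subst hrest
    rw [List.foldl_append]
    cases hr : l'.reverse with
    | nil =>
      have : l' = [] := by simpa using congrArg List.reverse hr
      subst this
      exact ⟨[], by simp [pvBStep, pvRunLoop]⟩
    | cons k' rest' =>
      obtain ⟨pre, hpre⟩ := ih k' rest' hr
      simp only [List.foldl_cons, List.foldl_nil]
      rw [hpre]
      unfold pvBStep
      rw [List.getLast?_concat, List.dropLast_concat]
      by_cases hke : k' = e
      · subst hke
        refine ⟨pre, ?_⟩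
        simp only [beq_self_eq_true, if_true]
        have h1 : pvRunLoop k' (k' :: k' :: rest') 0 = pvRunLoop k' (k' :: rest') 0 + 1 := by
          show (if (k' != k') = true then (0:Int) else pvRunLoop k' (k' :: rest') (0 + 1))
              = pvRunLoop k' (k' :: rest') 0 + 1
          simp only [bne_self_eq_false, Bool.false_eq_true, if_false]
          simpa using pvRunLoop_add k' (k' :: rest') 0
        rw [h1]
      · refine ⟨pre ++ [(k', pvRunLoop k' (k' :: rest') 0)], ?_⟩
        have hbe : (k' == e) = false := by simp [hke]
        have h2 : pvRunLoop e (e :: k' :: rest') 0 = (1 : Int) := by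
          simp [pvRunLoop, hke]
        simp [hbe, h2]

-- ===== VERDICT (by name: the statement is the Claim_ definition above) =====
theorem calculate_consecutive_days_spec : Claim_equal_calculate_consecutive_days := by
  intro data _ hpre
  unfold Pre_calculate_consecutive_days at hpre
  unfold Spec_calculate_consecutive_days
  obtain ⟨x, d1, hd'⟩ : ∃ x d1, data.reverse = x :: d1 := by
    cases hr : data.reverse with
    | nil =>
      rw [List.reverse_eq_nil_iff] at hr
      subst hr; simp at hpre
    | cons x d1 => exact ⟨x, d1, rfl⟩
  obtain ⟨y, t, hd1⟩ : ∃ y t, d1 = y :: t := by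
    cases d1 with
    | nil =>
      exfalso
      have := congrArg List.length hd'
      simp at this; omega
    | cons y t => exact ⟨y, t, rfl⟩
  subst hd1
  -- A's side
  have hA : calculate_consecutive_days data
      = (pvALoop (x :: y :: t) (decide (x - y ≥ 0))
          (PySem.List.pyRange 1 (((x :: y :: t).length : Int) - 1) 1) 1,
         decide (x - y ≥ 0)) := by
    unfold calculate_consecutive_days
    rw [PySem.List.slice?_none_none_neg_one, hd']
    simp [PySem.List.pyGetD]
  -- B's side: the direction list reversed starts with first_event
  have hrev : (pvPairsF data).reverse = decide (x - y ≥ 0) :: pvPairs (y :: t) := by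
    rw [pvPairsF_reverse, hd']; rfl
  obtain ⟨pre, hpre'⟩ := pvRle_lastRun (pvPairsF data) _ _ hrev
  have hB : calculate_consecutive_days_alt data
      = (pvRunLoop (decide (x - y ≥ 0))
          (decide (x - y ≥ 0) :: pvPairs (y :: t)) 0,
         decide (x - y ≥ 0)) := by
    unfold calculate_consecutive_days_alt
    simp only [pvPairsF_eq_zipWith, hpre', PySem.List.pyGet?_neg_one, List.getLast?_concat,
      Option.getD_some]
  rw [hA, hB]
  have hloop := pvALoop_eq (x :: y :: t) (decide (x - y ≥ 0)) (x :: y :: t).length 1 1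
    (by omega) (by omega)
  push_cast at hloop
  rw [hloop]
  rw [pvRunLoop]
  simp
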